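-- pv_equiv track=rewrite | github.com/ofrimasad/qa_translate | src/utils/resilience_vs_context_test.py | index_to_sentence_index
-- ===== SOURCE A (Python) =====
-- def index_to_sentence_index(index: int, sentences: list):
--     """
--     :param index: original index
--     :param sentences: list of sentences
--     :return: index of containing sentence, index in the containing sentence
--     """
--     total = 0
--     total_prev = 0
--     for i, s in enumerate(sentences):
--         total += len(s) + 1
--         if index < total:
--             return i, index - total_prev
--         total_prev = total
-- ===== SOURCE B (Python) =====
-- def index_to_sentence_index(index: int, sentences: list):
--     """
--     :param index: original index
--     :param sentences: list of sentences
--     :return: index of containing sentence, index in the containing sentence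
--     """
--     # prefix sums of len(s)+1, then binary search for the first one exceeding index
--     cum = []
--     t = 0
--     for s in sentences:
--         t += len(s) + 1
--         cum.append(t)
--     if not cum or index >= cum[-1]:
--         return None
--     lo, hi = 0, len(cum)
--     while lo < hi:
--         mid = (lo + hi) // 2
--         if index < cum[mid]:
--             hi = mid
--         else:
--             lo = mid + 1
--     return lo, index - (cum[lo - 1] if lo > 0 else 0)
-- ===== Notes on version B (the rewrite author's own statement) =====
-- stated objective: alternative
-- what changed: Replaces the single linear scan carrying running totals by building the prefix-sum array of len(s)+1 once and binary-searching it for the first prefix sum exceeding index.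
-- outside the precondition, e.g. on index_to_sentence_index(5, ['ab']): A returns None, B returns None; on index_to_sentence_index(0, []): A returns None, B returns None
import Mathlib
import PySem

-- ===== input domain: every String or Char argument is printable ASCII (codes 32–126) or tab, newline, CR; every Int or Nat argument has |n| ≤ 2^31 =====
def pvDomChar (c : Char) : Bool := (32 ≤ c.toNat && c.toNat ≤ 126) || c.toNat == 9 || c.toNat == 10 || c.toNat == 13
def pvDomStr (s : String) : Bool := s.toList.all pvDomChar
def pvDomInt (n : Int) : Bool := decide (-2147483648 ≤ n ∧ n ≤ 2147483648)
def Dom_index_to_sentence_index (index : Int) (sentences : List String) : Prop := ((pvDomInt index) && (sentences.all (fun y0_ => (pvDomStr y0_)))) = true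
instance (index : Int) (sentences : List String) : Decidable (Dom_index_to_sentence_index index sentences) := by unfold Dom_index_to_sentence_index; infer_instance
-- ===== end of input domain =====

-- B replaces A's linear scan with prefix sums + binary search (alternative decomposition,
-- same return value wherever A returns a pair; both return None outside Pre_, excluded below).

-- ===== PORT A =====
-- the for-loop of A: state (i, total, total_prev); falls through to (0,0) where Python returns None (outside Pre_)
def pvLoopA (index : Int) : Int → Int → Int → List String → Int × Int
  | _, _, _, [] => (0, 0)
  | i, total, total_prev, s :: rest =>
    let total' := total + PySem.Str.len s + 1
    if index < total' then (i, index - total_prev)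
    else pvLoopA index (i + 1) total' total' rest

def index_to_sentence_index (index : Int) (sentences : List String) : Int × Int :=
  pvLoopA index 0 0 0 sentences

-- ===== PORT B =====
-- the cum-building loop of Source B (appends t + len(s) + 1 in order, carrying t)
def pvBuildCum (t : Int) : List String → List Int
  | [] => []
  | s :: rest => (t + PySem.Str.len s + 1) :: pvBuildCum (t + PySem.Str.len s + 1) rest

-- the while-loop of Source B: binary search for the first position whose prefix sum exceeds index
def pvBSearch (cum : List Int) (index : Int) (lo hi : Nat) : Nat :=
  if h : lo < hi then
    let mid := (lo + hi) / 2
    if index < cum.getD mid 0 then pvBSearch cum index lo mid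
    else pvBSearch cum index (mid + 1) hi
  else lo
termination_by hi - lo
decreasing_by all_goals omega

def index_to_sentence_index_alt (index : Int) (sentences : List String) : Int × Int :=
  let cum := pvBuildCum 0 sentences
  match cum.getLast? with
  | none => (0, 0)      -- Python returns None here (empty list); outside Pre_
  | some last =>
    if last ≤ index then (0, 0)      -- Python returns None here (index out of range); outside Pre_
    else
      let lo := pvBSearch cum index 0 cum.length
      ((lo : Int), index - (if 0 < lo then cum.getD (lo - 1) 0 else 0))

-- ===== PRECONDITION & SPEC =====
-- Pre_ excludes exactly the inputs on which Python A falls off the loop and returns None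
-- (no 2-tuple of ints): the empty list, and index ≥ sum of len(s)+1 over the sentences.
def Pre_index_to_sentence_index (index : Int) (sentences : List String) : Prop :=
  sentences ≠ [] ∧ index < ((sentences.map (fun s => PySem.Str.len s + 1)).sum)
instance (index : Int) (sentences : List String) : Decidable (Pre_index_to_sentence_index index sentences) := by unfold Pre_index_to_sentence_index; infer_instance

def pvWitness_index_to_sentence_index : Int × List String := (3, ["ab", "cd"])

def Spec_index_to_sentence_index (index : Int) (sentences : List String) (out : Int × Int) : Prop := out = index_to_sentence_index_alt index sentences
instance (index : Int) (sentences : List String) (out : Int × Int) : Decidable (Spec_index_to_sentence_index index sentences out) := by unfold Spec_index_to_sentence_index; infer_instance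

-- ===== CLAIM (what is proved, stated in full; the proofs are below) =====
def Claim_equal_index_to_sentence_index : Prop := ∀ (index : Int) (sentences : List String), Dom_index_to_sentence_index index sentences → Pre_index_to_sentence_index index sentences → Spec_index_to_sentence_index index sentences (index_to_sentence_index index sentences)

-- ===== LEMMAS AND PROOFS =====

-- sum of len(s)+1 over a list of sentences
def pvS (l : List String) : Int := (l.map (fun s => PySem.Str.len s + 1)).sum

lemma pvLen_nonneg (s : String) : 0 ≤ PySem.Str.len s := by
  have h := PySem.Str.len_eq s
  omega

lemma pvS_nonneg (l : List String) : 0 ≤ pvS l := by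
  induction l with
  | nil => simp [pvS]
  | cons s rest ih =>
    simp only [pvS, List.map_cons, List.sum_cons] at *
    have hl := pvLen_nonneg s
    omega

lemma pvBuildCum_length (t : Int) (l : List String) : (pvBuildCum t l).length = l.length := by
  induction l generalizing t with
  | nil => simp [pvBuildCum]
  | cons s rest ih => simp [pvBuildCum, ih]

lemma pvBuildCum_getD (l : List String) : ∀ (t : Int) (k : Nat), k < l.length →
    (pvBuildCum t l).getD k 0 = t + pvS (l.take (k + 1)) := by
  induction l with
  | nil => intro t k hk; simp at hk
  | cons s rest ih =>
    intro t k hk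
    cases k with
    | zero =>
      simp only [pvBuildCum, List.getD_cons_zero, List.take_succ_cons, List.take_zero,
        pvS, List.map_cons, List.map_nil, List.sum_cons, List.sum_nil]
      ring
    | succ k' =>
      simp only [pvBuildCum, List.getD_cons_succ, List.take_succ_cons]
      rw [ih _ k' (by simpa using hk)]
      simp only [pvS, List.map_cons, List.sum_cons]
      ring

lemma pvS_take_mono (l : List String) (a b : Nat) (hab : a ≤ b) :
    pvS (l.take a) ≤ pvS (l.take b) := by
  have hb : b = a + (b - a) := by omega
  rw [hb, List.take_add]
  simp only [pvS, List.map_append, List.sum_append]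
  have := pvS_nonneg ((l.drop a).take (b - a))
  simp only [pvS] at this
  omega

lemma pvBuildCum_mono (l : List String) (t : Int) (j k : Nat) (hjk : j ≤ k)
    (hk : k < l.length) :
    (pvBuildCum t l).getD j 0 ≤ (pvBuildCum t l).getD k 0 := by
  rw [pvBuildCum_getD l t j (by omega), pvBuildCum_getD l t k hk]
  have := pvS_take_mono l (j + 1) (k + 1) (by omega)
  omega

lemma pvBuildCum_getLast? (l : List String) (hl : l ≠ []) (t : Int) :
    (pvBuildCum t l).getLast? = some (t + pvS l) := by
  induction l generalizing t with
  | nil => exact absurd rfl hl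
  | cons s rest ih =>
    cases rest with
    | nil =>
      simp only [pvBuildCum, List.getLast?_singleton, pvS, List.map_cons, List.map_nil,
        List.sum_cons, List.sum_nil, Option.some.injEq]
      ring
    | cons s' rest' =>
      have hstep : pvBuildCum t (s :: s' :: rest') =
          (t + PySem.Str.len s + 1) ::
            (t + PySem.Str.len s + 1 + PySem.Str.len s' + 1) ::
              pvBuildCum (t + PySem.Str.len s + 1 + PySem.Str.len s' + 1) rest' := rfl
      rw [hstep, List.getLast?_cons_cons,
        show (t + PySem.Str.len s + 1 + PySem.Str.len s' + 1) ::
            pvBuildCum (t + PySem.Str.len s + 1 + PySem.Str.len s' + 1) rest' =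
          pvBuildCum (t + PySem.Str.len s + 1) (s' :: rest') from rfl,
        ih (by simp) _]
      simp only [pvS, List.map_cons, List.sum_cons, Option.some.injEq]
      ring

-- binary-search invariant: result r keeps cum[j] ≤ index for j < r and index < cum[j] for r ≤ j < len
lemma pvBSearch_spec (cum : List Int) (index : Int)
    (mono : ∀ j k, j ≤ k → k < cum.length → cum.getD j 0 ≤ cum.getD k 0) :
    ∀ (d lo hi : Nat), hi - lo ≤ d → lo ≤ hi → hi ≤ cum.length →
    (∀ j, j < lo → cum.getD j 0 ≤ index) →
    (∀ j, hi ≤ j → j < cum.length → index < cum.getD j 0) →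
    lo ≤ pvBSearch cum index lo hi ∧ pvBSearch cum index lo hi ≤ hi ∧
    (∀ j, j < pvBSearch cum index lo hi → cum.getD j 0 ≤ index) ∧
    (∀ j, pvBSearch cum index lo hi ≤ j → j < cum.length → index < cum.getD j 0) := by
  intro d
  induction d with
  | zero =>
    intro lo hi hd hlh hhl hlow hhigh
    have heq : lo = hi := by omega
    rw [pvBSearch]
    subst heq
    simp only [lt_irrefl, dite_false]
    exact ⟨le_refl _, le_refl _, hlow, hhigh⟩
  | succ d ih =>
    intro lo hi hd hlh hhl hlow hhigh
    rw [pvBSearch]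
    by_cases h : lo < hi
    · simp only [h, dite_true]
      set mid := (lo + hi) / 2 with hmid
      have hm1 : lo ≤ mid := by omega
      have hm2 : mid < hi := by omega
      by_cases hc : index < cum.getD mid 0
      · simp only [hc, if_true]
        have := ih lo mid (by omega) (by omega) (by omega) hlow
          (fun j hj1 hj2 => lt_of_lt_of_le hc (mono mid j hj1 hj2))
        exact ⟨this.1, le_trans this.2.1 (by omega), this.2.2⟩
      · simp only [hc, if_false]
        have := ih (mid + 1) hi (by omega) (by omega) hhl
          (fun j hj => le_trans (mono j mid (by omega) (by omega)) (not_lt.mp hc))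
          hhigh
        exact ⟨le_trans (by omega) this.1, this.2⟩
    · simp only [h, dite_false]
      have heq : lo = hi := by omega
      subst heq
      exact ⟨le_refl _, le_refl _, hlow, hhigh⟩

-- A's loop returns (i + k, index - prev-of-k) where k is the first position with index < cum[k]
lemma pvLoopA_eq (index : Int) : ∀ (l : List String) (i t : Int) (k : Nat),
    k < l.length →
    (∀ j, j < k → (pvBuildCum t l).getD j 0 ≤ index) →
    index < (pvBuildCum t l).getD k 0 →
    pvLoopA index i t t l =
      (i + (k : Int), index - (if k = 0 then t else (pvBuildCum t l).getD (k - 1) 0)) := by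
  intro l
  induction l with
  | nil => intro i t k hk; simp at hk
  | cons s rest ih =>
    intro i t k hk hlow hk2
    by_cases hidx : index < t + PySem.Str.len s + 1
    · have hk0 : k = 0 := by
        by_contra h0
        have h00 := hlow 0 (by omega)
        simp only [pvBuildCum, List.getD_cons_zero] at h00
        omega
      subst hk0
      show (if index < t + PySem.Str.len s + 1 then (i, index - t)
            else pvLoopA index (i + 1) (t + PySem.Str.len s + 1) (t + PySem.Str.len s + 1) rest) = _
      rw [if_pos hidx]
      simp
    · have hk0 : k ≠ 0 := by
        intro h0; subst h0
        simp only [pvBuildCum, List.getD_cons_zero] at hk2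
        omega
      obtain ⟨k', rfl⟩ := Nat.exists_eq_succ_of_ne_zero hk0
      have hstep : pvLoopA index i t t (s :: rest) =
          pvLoopA index (i + 1) (t + PySem.Str.len s + 1) (t + PySem.Str.len s + 1) rest := by
        show (if index < t + PySem.Str.len s + 1 then (i, index - t)
              else pvLoopA index (i + 1) (t + PySem.Str.len s + 1) (t + PySem.Str.len s + 1) rest) = _
        rw [if_neg hidx]
      rw [hstep, ih (i + 1) (t + PySem.Str.len s + 1) k' (by simpa using hk)
        (fun j hj => by
          have := hlow (j + 1) (by omega)
          simpa only [pvBuildCum, List.getD_cons_succ] using this)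
        (by simpa only [pvBuildCum, List.getD_cons_succ] using hk2)]
      cases k' with
      | zero =>
        simp only [pvBuildCum, Nat.succ_ne_zero, Nat.succ_sub_one,
          List.getD_cons_zero, Prod.mk.injEq, if_true, if_false]
        constructor
        · push_cast; ring
        · trivial
      | succ k'' =>
        simp only [pvBuildCum, Nat.succ_ne_zero, Nat.succ_sub_one,
          List.getD_cons_succ, Prod.mk.injEq, reduceIte]
        constructor
        · push_cast; ring
        · trivial

-- ===== VERDICT (by name: the statement is the Claim_ definition above) =====
theorem index_to_sentence_index_spec : Claim_equal_index_to_sentence_index := by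
  intro index sentences _ hpre
  obtain ⟨hne, hlt⟩ := hpre
  unfold Spec_index_to_sentence_index index_to_sentence_index index_to_sentence_index_alt
  have hlt' : index < pvS sentences := hlt
  have hlast : (pvBuildCum 0 sentences).getLast? = some (0 + pvS sentences) :=
    pvBuildCum_getLast? sentences hne 0
  simp only [hlast]
  have hnotle : ¬ (0 + pvS sentences ≤ index) := by omega
  rw [if_neg hnotle]
  set cum := pvBuildCum 0 sentences with hcum
  have hlen : cum.length = sentences.length := pvBuildCum_length 0 sentences
  have hpos : 0 < sentences.length := List.length_pos_of_ne_nil hne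
  have mono : ∀ j k, j ≤ k → k < cum.length → cum.getD j 0 ≤ cum.getD k 0 := by
    intro j k hjk hk
    exact pvBuildCum_mono sentences 0 j k hjk (by omega)
  obtain ⟨h1, h2, h3, h4⟩ := pvBSearch_spec cum index mono cum.length 0 cum.length
    (by omega) (by omega) (le_refl _)
    (fun j hj => by omega)
    (fun j hj1 hj2 => by omega)
  set r := pvBSearch cum index 0 cum.length with hr
  -- r < length: otherwise cum[len-1] = pvS sentences ≤ index, contradicting Pre_
  have hrlen : r < cum.length := by
    by_contra hge
    have h5 := h3 (cum.length - 1) (by omega)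
    rw [hcum, pvBuildCum_getD sentences 0 (cum.length - 1) (by omega)] at h5
    have htake : sentences.take (cum.length - 1 + 1) = sentences := by
      rw [List.take_of_length_le]; omega
    rw [htake] at h5
    omega
  have hA := pvLoopA_eq index sentences 0 0 r (by omega) (by rw [← hcum]; exact h3)
    (by rw [← hcum]; exact h4 r (le_refl _) hrlen)
  rw [← hcum] at hA
  rw [hA]
  by_cases hr0 : r = 0
  · simp only [if_pos hr0, if_neg (by omega : ¬ (0:Nat) < r), zero_add]
  · simp only [if_neg hr0, if_pos (show 0 < r by omega), zero_add]
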